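-- pv_equiv track=rewrite | github.com/vineeth-89/O-RADAR | ORAN_Helper.py | get_correlatd_count
-- ===== SOURCE A (Python) =====
-- def get_correlatd_count(corr_pairs):
--     cnt = {}
--     for pair in corr_pairs:
--         # check if it exists or not
--         if pair[0] in cnt:
--             cnt[pair[0]] = cnt[pair[0]] + 1
--         else:
--             cnt[pair[0]] = 1
--
--     return cnt
-- ===== SOURCE B (Python) =====
-- def get_correlatd_count(corr_pairs):
--     firsts = [p[0] for p in corr_pairs]
--     cnt = {}
--     while firsts:
--         x = firsts[0]
--         cnt[x] = sum(1 for y in firsts if y == x)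
--         firsts = [y for y in firsts if y != x]
--     return cnt
-- ===== Notes on version B (the rewrite author's own statement) =====
-- stated objective: alternative
-- what changed: Replaces A's single incremental per-pair tally loop with a partition-and-extract scheme: collect the first components, then repeatedly take the leading key, count all its occurrences in one scan, and filter them out, iterating once per distinct key (O(n*k) instead of O(n)).
import Mathlib
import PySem

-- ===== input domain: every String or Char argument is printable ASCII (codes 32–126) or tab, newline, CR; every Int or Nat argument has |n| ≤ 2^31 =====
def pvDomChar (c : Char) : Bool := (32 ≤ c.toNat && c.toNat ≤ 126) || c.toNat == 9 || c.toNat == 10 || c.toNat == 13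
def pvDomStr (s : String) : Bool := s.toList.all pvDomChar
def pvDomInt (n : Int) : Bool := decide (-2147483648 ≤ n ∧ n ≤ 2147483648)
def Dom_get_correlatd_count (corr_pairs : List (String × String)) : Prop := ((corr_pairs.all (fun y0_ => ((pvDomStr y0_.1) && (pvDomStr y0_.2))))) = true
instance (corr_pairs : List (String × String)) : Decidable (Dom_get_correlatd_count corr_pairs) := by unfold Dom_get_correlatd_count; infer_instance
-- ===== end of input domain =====

-- B counts by partition-and-extract: repeatedly take the leading first-component, count its
-- occurrences in one scan and filter them out; same dict contents and key order as A
-- (alternative decomposition, not faster).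

-- ===== PORT A =====
-- cnt[pair[0]] when 'pair[0] in cnt' holds is ported as getD _ 0 (the key is present, so the
-- default is never used; exact).
def get_correlatd_count (corr_pairs : List (String × String)) : List (String × Int) :=
  (corr_pairs.foldl
    (fun cnt pair =>
      if cnt.contains pair.1 then cnt.insert pair.1 (cnt.getD pair.1 0 + 1)
      else cnt.insert pair.1 1)
    PySem.Dict.empty).items

-- ===== PORT B =====
-- the while loop over the shrinking 'firsts' list; sum(1 for y in firsts if y == x) is
-- PySem.List.count firsts x (a 0/1-sum IS the count), firsts = [y for y in firsts if y != x]
-- is List.filter.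
def bWhile : List String → PySem.Dict String Int → PySem.Dict String Int
  | [], cnt => cnt
  | x :: t, cnt =>
      bWhile ((x :: t).filter (fun y => y != x))
        (cnt.insert x ((PySem.List.count (x :: t) x : Nat) : Int))
  termination_by l => l.length
  decreasing_by
    simp only [List.filter_cons, bne_self_eq_false, List.length_cons]
    exact Nat.lt_succ_of_le (List.length_filter_le _ t)

def get_correlatd_count_alt (corr_pairs : List (String × String)) : List (String × Int) :=
  (bWhile (corr_pairs.map (fun p => p.1)) PySem.Dict.empty).items

-- ===== PRECONDITION & SPEC =====
def Spec_get_correlatd_count (corr_pairs : List (String × String)) (out : List (String × Int)) : Prop := out = get_correlatd_count_alt corr_pairs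
instance (corr_pairs : List (String × String)) (out : List (String × Int)) : Decidable (Spec_get_correlatd_count corr_pairs out) := by unfold Spec_get_correlatd_count; infer_instance

-- ===== CLAIM (what is proved, stated in full; the proofs are below) =====
def Claim_equal_get_correlatd_count : Prop := ∀ (corr_pairs : List (String × String)), Dom_get_correlatd_count corr_pairs → Spec_get_correlatd_count corr_pairs (get_correlatd_count corr_pairs)

-- ===== LEMMAS AND PROOFS =====

-- A's loop body is exactly the getD-increment counter step.
lemma a_step_eq (cnt : PySem.Dict String Int) (k : String) :
    (if cnt.contains k then cnt.insert k (cnt.getD k 0 + 1) else cnt.insert k 1)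
      = cnt.insert k (cnt.getD k 0 + 1) := by
  by_cases h : cnt.contains k = true
  · simp [h]
  · simp only [Bool.not_eq_true] at h
    simp [h, PySem.Dict.getD_of_not_contains]

-- discard = filter (!= x) on a Set (definitional)
lemma discard_eq_filter {α : Type} [BEq α] [LawfulBEq α] (s : PySem.Set α) (x : α) :
    PySem.Set.discard s x = s.filter (fun y => y != x) := by
  unfold PySem.Set.discard
  rfl

-- first-occurrence dedup commutes with filter
lemma ofList_filter {α : Type} [BEq α] [LawfulBEq α] (p : α → Bool) (xs : List α) :
    PySem.Set.ofList (xs.filter p) = (PySem.Set.ofList xs).filter p := by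
  induction xs with
  | nil => simp [PySem.Set.ofList_nil]
  | cons x t ih =>
    by_cases hp : p x = true
    · rw [List.filter_cons_of_pos hp, PySem.Set.ofList_cons, PySem.Set.ofList_cons,
          discard_eq_filter, discard_eq_filter, ih, List.filter_cons_of_pos hp,
          List.filter_filter, List.filter_filter]
      exact congrArg _ (List.filter_congr (fun a _ => Bool.and_comm _ _))
    · have hp' : p x = false := by simpa using hp
      rw [List.filter_cons_of_neg (by simp [hp']), PySem.Set.ofList_cons, discard_eq_filter,
          List.filter_cons_of_neg (by simp [hp']), List.filter_filter, ih]
      refine List.filter_congr (fun a _ => ?_)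
      by_cases hax : a = x
      · simp [hax, hp']
      · simp [hax]

-- peeling the head key off a first-occurrence dedup
lemma ofList_cons_filter {α : Type} [BEq α] [LawfulBEq α] (x : α) (t : List α) :
    PySem.Set.ofList (x :: t) = x :: PySem.Set.ofList (t.filter (fun y => y != x)) := by
  rw [PySem.Set.ofList_cons, discard_eq_filter, ofList_filter]

-- the while-loop invariant: with all keys of l fresh in d, the loop appends the counter items of l
lemma bWhile_items : ∀ (n : Nat) (l : List String) (d : PySem.Dict String Int),
    l.length ≤ n → (∀ k ∈ l, d.contains k = false) →
    (bWhile l d).items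
      = d.items ++ (PySem.Set.ofList l).map (fun k => (k, (l.count k : Int))) := by
  intro n
  induction n with
  | zero =>
    intro l d hl _
    have : l = [] := List.length_eq_zero_iff.mp (Nat.le_zero.mp hl)
    subst this
    simp [bWhile, PySem.Set.ofList_nil]
  | succ n ih =>
    intro l d hl hd
    match l with
    | [] => simp [bWhile, PySem.Set.ofList_nil]
    | x :: t =>
      rw [bWhile]
      have hfx : (x :: t).filter (fun y => y != x) = t.filter (fun y => y != x) := by
        simp
      rw [hfx]
      have hlen : (t.filter (fun y => y != x)).length ≤ n :=
        le_trans (List.length_filter_le _ t) (Nat.le_of_succ_le_succ hl)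
      have hfresh : ∀ k ∈ t.filter (fun y => y != x),
          ((d.insert x ((PySem.List.count (x :: t) x : Nat) : Int)).contains k) = false := by
        intro k hk
        simp only [List.mem_filter, bne_iff_ne] at hk
        rw [PySem.Dict.contains_insert]
        simp [hk.2, hd k (List.mem_cons_of_mem _ hk.1)]
      rw [ih _ _ hlen hfresh,
          PySem.Dict.items_insert_of_not_contains _ _ (hd x (List.mem_cons_self ..)),
          ofList_cons_filter, List.map_cons, List.append_assoc]
      congr 1
      rw [List.singleton_append]
      congr 1
      refine List.map_congr_left (fun k hk => ?_)
      have hk' : k ∈ t.filter (fun y => y != x) := (PySem.Set.mem_ofList _ _).mp hk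
      simp only [List.mem_filter, bne_iff_ne] at hk'
      have h1 : (x :: t).count k = t.count k := List.count_cons_of_ne (Ne.symm hk'.2) (l := t)
      have h2 : (t.filter (fun y => y != x)).count k = t.count k :=
        List.count_filter (by simp [hk'.2])
      rw [h1, h2]

theorem get_correlatd_count_spec : Claim_equal_get_correlatd_count := by
  intro corr_pairs _
  unfold Spec_get_correlatd_count get_correlatd_count get_correlatd_count_alt
  set firsts := corr_pairs.map (fun p => p.1) with hf
  have hA : (corr_pairs.foldl
      (fun cnt pair =>
        if cnt.contains pair.1 then cnt.insert pair.1 (cnt.getD pair.1 0 + 1)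
        else cnt.insert pair.1 1)
      PySem.Dict.empty)
      = PySem.Dict.counter firsts := by
    rw [hf, ← PySem.Dict.foldl_insert_getD_add_one_eq_counter, List.foldl_map]
    congr 1
    funext cnt pair
    exact a_step_eq cnt pair.1
  rw [hA, PySem.Dict.items_counter,
      bWhile_items firsts.length firsts PySem.Dict.empty le_rfl (by simp)]
  rfl
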